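-- pv_equiv track=rewrite | github.com/kokkulashravankumar/Sas2Python | OurProjects/sas2py_v4 (2).py | generate_grouping_columns
-- ===== SOURCE A (Python) =====
-- def generate_grouping_columns(class_cols):
--     col_group=[]
--     for col in class_cols[::-1]:
--         col_group1=[col]
--         col_group1=[[col]+x for x in col_group]
--         col_group1.insert(0,[col])
--         col_group.extend(col_group1)
--     return col_group
-- ===== SOURCE B (Python) =====
-- def generate_grouping_columns(class_cols):
--     if not class_cols:
--         return []
--     first = class_cols[0]
--     rest = generate_grouping_columns(class_cols[1:])
--     return rest + [[first]] + [[first] + x for x in rest]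
-- ===== Notes on version B (the rewrite author's own statement) =====
-- stated objective: simpler
-- what changed: Replaces the iterative reverse-traversal with a mutable accumulator by a direct structural recursion peeling the first element: rest + [[first]] + prefixed copies of rest.
import Mathlib
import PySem

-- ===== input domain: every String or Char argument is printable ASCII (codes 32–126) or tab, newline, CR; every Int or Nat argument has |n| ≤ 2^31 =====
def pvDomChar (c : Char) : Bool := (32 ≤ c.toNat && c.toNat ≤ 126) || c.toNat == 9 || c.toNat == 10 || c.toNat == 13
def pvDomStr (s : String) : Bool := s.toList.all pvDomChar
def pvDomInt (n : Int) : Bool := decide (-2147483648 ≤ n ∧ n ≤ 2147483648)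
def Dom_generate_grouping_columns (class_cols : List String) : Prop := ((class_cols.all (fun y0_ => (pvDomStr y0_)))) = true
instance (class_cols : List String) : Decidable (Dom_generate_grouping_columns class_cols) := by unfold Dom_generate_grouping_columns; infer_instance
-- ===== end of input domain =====

-- B replaces A's reverse-iteration with a mutable accumulator by a direct structural
-- recursion on the front of the list (simpler decomposition, same output order).

-- ===== PORT A =====
def generate_grouping_columns (class_cols : List String) : List (List String) :=
  -- for col in class_cols[::-1]:  (slice with step -1)
  ((PySem.List.slice? class_cols none none (-1)).getD []).foldl
    (fun col_group col =>
      -- col_group1 = [[col]+x for x in col_group]; col_group1.insert(0,[col]); col_group.extend(col_group1)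
      let col_group1 := col_group.map (fun x => [col] ++ x)
      let col_group1 := [col] :: col_group1
      col_group ++ col_group1) []

-- ===== PORT B =====
def generate_grouping_columns_alt : List String → List (List String)
  | [] => []
  | first :: tl =>
    let rest := generate_grouping_columns_alt tl
    rest ++ [[first]] ++ rest.map (fun x => [first] ++ x)

-- ===== PRECONDITION & SPEC =====
def Spec_generate_grouping_columns (class_cols : List String) (out : List (List String)) : Prop := out = generate_grouping_columns_alt class_cols
instance (class_cols : List String) (out : List (List String)) : Decidable (Spec_generate_grouping_columns class_cols out) := by unfold Spec_generate_grouping_columns; infer_instance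

-- ===== CLAIM (what is proved, stated in full; the proofs are below) =====
def Claim_equal_generate_grouping_columns : Prop := ∀ (class_cols : List String), Dom_generate_grouping_columns class_cols → Spec_generate_grouping_columns class_cols (generate_grouping_columns class_cols)

-- ===== LEMMAS AND PROOFS =====
theorem gen_eq_alt : ∀ (l : List String), generate_grouping_columns l = generate_grouping_columns_alt l := by
  intro l
  induction l with
  | nil => simp [generate_grouping_columns, generate_grouping_columns_alt,
      PySem.List.slice?_none_none_neg_one]
  | cons a tl ih =>
    simp only [generate_grouping_columns, PySem.List.slice?_none_none_neg_one,
      Option.getD_some, List.reverse_cons, List.foldl_append, List.foldl_cons,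
      List.foldl_nil] at ih ⊢
    rw [ih, generate_grouping_columns_alt]; simp

-- ===== VERDICT (by name: the statement is the Claim_ definition above) =====
theorem generate_grouping_columns_spec : Claim_equal_generate_grouping_columns := by
  intro l _
  exact gen_eq_alt l
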